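-- pv_equiv track=rewrite | github.com/sxrh/Python-Excercises | parallelogram_size.py | count_consecutive_above_1s
-- ===== SOURCE A (Python) =====
-- def count_consecutive_above_1s(grid):
--     m = len(grid)
--     n = len(grid[0])
--     for i in range(1,m):
--         for j in range(n):
--             if grid[i][j] == 1:
--                 grid[i][j] = grid[i-1][j] +1
--     #if only 1, we count it as 0 as we need at least 2 1s
--     for i in range(m):
--         for j in range(n):
--             if grid[i][j] == 1:
--                 grid[i][j] = 0
--     return grid
-- ===== SOURCE B (Python) =====
-- def count_consecutive_above_1s(grid):
--     n = len(grid[0])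
--     for j in range(n):
--         prev = 0
--         for i in range(len(grid)):
--             val = prev + 1 if i > 0 and grid[i][j] == 1 else grid[i][j]
--             prev = val
--             grid[i][j] = 0 if val == 1 else val
--     return grid
-- ===== Notes on version B (the rewrite author's own statement) =====
-- stated objective: simpler
-- what changed: Replaces A's two full row-major passes (accumulate, then zero lone 1s) by a single column-major sweep that keeps the un-zeroed running count in a local variable and writes each cell's final value once.
import Mathlib
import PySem

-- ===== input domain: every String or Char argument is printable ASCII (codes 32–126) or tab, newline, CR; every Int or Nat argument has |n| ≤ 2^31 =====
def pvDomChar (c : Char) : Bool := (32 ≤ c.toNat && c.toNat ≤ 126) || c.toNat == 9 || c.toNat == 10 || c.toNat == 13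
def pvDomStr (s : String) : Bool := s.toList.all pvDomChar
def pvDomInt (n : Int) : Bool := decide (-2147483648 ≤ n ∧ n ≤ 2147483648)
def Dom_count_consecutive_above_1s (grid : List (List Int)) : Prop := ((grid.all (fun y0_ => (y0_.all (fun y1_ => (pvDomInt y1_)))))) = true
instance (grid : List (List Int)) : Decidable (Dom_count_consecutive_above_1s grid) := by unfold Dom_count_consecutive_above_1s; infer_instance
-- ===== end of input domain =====

-- B replaces A's two row-major passes by one column-major sweep with a running count (simpler, one pass);
-- both Pythons mutate `grid` in place and return it, so the theorems below are about the return value.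

-- cell read grid[i][j] (in range on every admitted input; default 0 outside)
def getc (g : List (List Int)) (i j : Nat) : Int := (g.getD i []).getD j 0
-- cell write grid[i][j] = v (in range on every admitted input; no-op outside)
def setc (g : List (List Int)) (i j : Nat) (v : Int) : List (List Int) :=
  g.set i ((g.getD i []).set j v)

-- ===== PORT A =====
-- body of A's first double loop: if grid[i][j] == 1: grid[i][j] = grid[i-1][j] + 1
def body1 (g : List (List Int)) (i j : Nat) : List (List Int) :=
  if getc g i j = 1 then setc g i j (getc g (i-1) j + 1) else g
-- A's inner `for j in range(n)` of the first pass
def row1 (n : Nat) (g : List (List Int)) (i : Nat) : List (List Int) :=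
  (List.range n).foldl (fun g j => body1 g i j) g
-- body of A's second double loop: if grid[i][j] == 1: grid[i][j] = 0
def body2 (g : List (List Int)) (i j : Nat) : List (List Int) :=
  if getc g i j = 1 then setc g i j 0 else g
-- A's inner `for j in range(n)` of the second pass
def row2 (n : Nat) (g : List (List Int)) (i : Nat) : List (List Int) :=
  (List.range n).foldl (fun g j => body2 g i j) g

def count_consecutive_above_1s (grid : List (List Int)) : List (List Int) :=
  let m := grid.length
  let n := (grid.headD []).length
  -- for i in range(1, m): for j in range(n): …
  let g1 := (List.range' 1 (m - 1)).foldl (row1 n) grid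
  -- for i in range(m): for j in range(n): …
  (List.range m).foldl (row2 n) g1

-- ===== PORT B =====
-- body of B's inner row loop, state (grid, prev):
--   val = prev + 1 if i > 0 and grid[i][j] == 1 else grid[i][j]; prev = val; grid[i][j] = 0 if val == 1 else val
def bstep (j : Nat) (s : List (List Int) × Int) (i : Nat) : List (List Int) × Int :=
  let val := if 0 < i ∧ getc s.1 i j = 1 then s.2 + 1 else getc s.1 i j
  (setc s.1 i j (if val = 1 then 0 else val), val)
-- B's inner `for i in range(len(grid))` for one column j, starting from prev = 0
def bcol (m : Nat) (g : List (List Int)) (j : Nat) : List (List Int) :=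
  ((List.range m).foldl (bstep j) (g, 0)).1

def count_consecutive_above_1s_alt (grid : List (List Int)) : List (List Int) :=
  let n := (grid.headD []).length
  -- for j in range(n): inner row sweep
  (List.range n).foldl (bcol grid.length) grid

-- ===== PRECONDITION & SPEC =====
-- Pre_ excludes exactly the inputs on which A raises IndexError: the empty grid (grid[0])
-- and ragged grids in which some row is shorter than the first row.
def Pre_count_consecutive_above_1s (grid : List (List Int)) : Prop :=
  grid ≠ [] ∧ ∀ row ∈ grid, (grid.headD []).length ≤ row.length
instance (grid : List (List Int)) : Decidable (Pre_count_consecutive_above_1s grid) := by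
  unfold Pre_count_consecutive_above_1s; infer_instance

def pvWitness_count_consecutive_above_1s : List (List Int) := [[1, 0], [1, 1], [1, 5]]

def Spec_count_consecutive_above_1s (grid : List (List Int)) (out : List (List Int)) : Prop := out = count_consecutive_above_1s_alt grid
instance (grid : List (List Int)) (out : List (List Int)) : Decidable (Spec_count_consecutive_above_1s grid out) := by unfold Spec_count_consecutive_above_1s; infer_instance

-- ===== CLAIM (what is proved, stated in full; the proofs are below) =====
def Claim_equal_count_consecutive_above_1s : Prop := ∀ (grid : List (List Int)), Dom_count_consecutive_above_1s grid → Pre_count_consecutive_above_1s grid → Spec_count_consecutive_above_1s grid (count_consecutive_above_1s grid)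

-- ===== LEMMAS AND PROOFS =====

-- accumulated (pre-zeroing) value of column j at row i, computed on the original grid
def colA (g : List (List Int)) (j : Nat) : Nat → Int
  | 0 => getc g 0 j
  | i + 1 => if getc g (i + 1) j = 1 then colA g j i + 1 else getc g (i + 1) j

-- final value of cell (i, j) (for i < m, j < n)
def tgt (g : List (List Int)) (i j : Nat) : Int :=
  if colA g j i = 1 then 0 else colA g j i

-- what one body1 step writes, in terms of the grid it sees
def a1 (g : List (List Int)) (i j : Nat) : Int :=
  if getc g i j = 1 then getc g (i-1) j + 1 else getc g i j
theorem setc_length (g : List (List Int)) (i j : Nat) (v : Int) :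
    (setc g i j v).length = g.length := by
  simp [setc]

theorem setc_rowlen (g : List (List Int)) (i j k : Nat) (v : Int) :
    ((setc g i j v).getD k []).length = (g.getD k []).length := by
  simp [setc, List.getD_eq_getElem?_getD, List.getElem?_set]
  split
  · next h => subst h
              by_cases hi : i < g.length <;> simp [hi, List.getElem?_eq_getElem, List.getD_eq_getElem?_getD]
  · rfl

theorem getc_setc (g : List (List Int)) (i j i' j' : Nat) (v : Int) :
    getc (setc g i j v) i' j' =
      if i = i' ∧ j = j' ∧ i < g.length ∧ j < (g.getD i []).length then v
      else getc g i' j' := by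
  simp only [getc, setc, List.getD_eq_getElem?_getD, List.getElem?_set]
  by_cases hii : i = i'
  · subst hii
    by_cases hi : i < g.length
    · simp [hi, List.getElem?_eq_getElem, List.getD_eq_getElem?_getD, List.getElem?_set]
      by_cases hjj : j = j'
      · subst hjj
        by_cases hj : j < (g[i]).length <;> simp [hj, List.getElem?_eq_getElem, List.getD_eq_getElem?_getD]
      · simp [hjj]
    · simp [hi]
  · simp [hii]
theorem grid_ext (g a b : List (List Int))
    (hla : a.length = g.length) (hlb : b.length = g.length)
    (hra : ∀ k, (a.getD k []).length = (g.getD k []).length)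
    (hrb : ∀ k, (b.getD k []).length = (g.getD k []).length)
    (h : ∀ i j, getc a i j = getc b i j) : a = b := by
  apply List.ext_getElem (by omega)
  intro i h1 h2
  apply List.ext_getElem
  · have := (hra i).trans (hrb i).symm
    simpa [List.getD_eq_getElem?_getD, List.getElem?_eq_getElem, h1, h2] using this
  · intro j hj1 hj2
    have := h i j
    simpa [getc, List.getD_eq_getElem?_getD, List.getElem?_eq_getElem, h1, h2,
      List.getD_eq_getElem, hj1, hj2] using this

theorem foldl_shape (f : List (List Int) → Nat → List (List Int)) (l : List Nat) (g : List (List Int))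
    (h : ∀ g a, (f g a).length = g.length ∧ ∀ k, ((f g a).getD k []).length = (g.getD k []).length) :
    (l.foldl f g).length = g.length ∧ ∀ k, ((l.foldl f g).getD k []).length = (g.getD k []).length := by
  induction l generalizing g with
  | nil => exact ⟨rfl, fun _ => rfl⟩
  | cons a l ih =>
    have h1 := h g a
    have h2 := ih (f g a)
    exact ⟨h2.1.trans h1.1, fun k => (h2.2 k).trans (h1.2 k)⟩




theorem body1_shape (g : List (List Int)) (i j : Nat) :
    (body1 g i j).length = g.length ∧ ∀ k, ((body1 g i j).getD k []).length = (g.getD k []).length := by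
  unfold body1; split
  · exact ⟨by simp [setc], fun k => setc_rowlen g i j k _⟩
  · exact ⟨rfl, fun _ => rfl⟩

theorem row1_partial_getc (g : List (List Int)) (i n : Nat) (hi0 : 0 < i) (hi : i < g.length)
    (hn : n ≤ (g.getD i []).length) :
    ∀ t, t ≤ n → ∀ i' j',
      getc ((List.range t).foldl (fun g j => body1 g i j) g) i' j' =
        if i' = i ∧ j' < t then a1 g i j' else getc g i' j' := by
  intro t
  induction t with
  | zero => intro _ i' j'; simp
  | succ t ih =>
    intro ht i' j'
    have ih' := ih (by omega)
    have hsh := foldl_shape (fun g j => body1 g i j) (List.range t) g (fun g a => body1_shape g i a)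
    rw [List.range_succ, List.foldl_append]
    simp only [List.foldl_cons, List.foldl_nil]
    generalize hgt : (List.range t).foldl (fun g j => body1 g i j) g = gt at ih' hsh
    have hread : getc gt i t = getc g i t := by rw [ih']; simp
    have hread' : getc gt (i-1) t = getc g (i-1) t := by
      rw [ih']
      rw [if_neg (by rintro ⟨h, _⟩; omega)]
    have hb : body1 gt i t = if getc g i t = 1 then setc gt i t (getc g (i-1) t + 1) else gt := by
      rw [body1, hread, hread']
    rw [hb]
    by_cases hc : getc g i t = 1
    · rw [if_pos hc, getc_setc]
      have hli : i < gt.length := by rw [hsh.1]; exact hi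
      have hlt : t < (gt.getD i []).length := by rw [hsh.2 i]; omega
      by_cases he : i = i' ∧ t = j'
      · obtain ⟨he1, he2⟩ := he; subst he1; subst he2
        rw [if_pos ⟨rfl, rfl, hli, hlt⟩]
        simp [a1, hc]
      · rw [if_neg (by tauto), ih']
        by_cases hii : i' = i
        · subst hii
          by_cases hjt : j' < t
          · simp [hjt, Nat.lt_succ_of_lt hjt]
          · have h2 : ¬ j' < t + 1 := by rcases he with _; omega
            simp [hjt, h2]
        · simp [hii]
    · rw [if_neg hc, ih']
      by_cases hii : i' = i
      · subst hii
        by_cases hjt : j' < t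
        · simp [hjt, Nat.lt_succ_of_lt hjt]
        · by_cases hjt1 : j' < t + 1
          · have : j' = t := by omega
            subst this
            simp [hjt, hjt1, a1, hc]
          · simp [hjt, hjt1]
      · simp [hii]
theorem row1_shape (n : Nat) (g : List (List Int)) (i : Nat) :
    (row1 n g i).length = g.length ∧ ∀ k, ((row1 n g i).getD k []).length = (g.getD k []).length :=
  foldl_shape _ _ _ (fun g a => body1_shape g i a)

theorem pass1_partial_getc (g : List (List Int)) (n : Nat)
    (hn : ∀ k < g.length, n ≤ (g.getD k []).length) :
    ∀ t, t < g.length → ∀ i' j',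
      getc ((List.range' 1 t).foldl (row1 n) g) i' j' =
        if i' ≤ t ∧ j' < n then colA g j' i' else getc g i' j' := by
  intro t
  induction t with
  | zero =>
    intro _ i' j'
    simp only [List.range'_zero, List.foldl_nil]
    by_cases h : i' ≤ 0 ∧ j' < n
    · obtain ⟨h1, h2⟩ := h
      have : i' = 0 := by omega
      subst this
      simp [colA, h2]
    · rw [if_neg h]
  | succ t ih =>
    intro ht i' j'
    have ih' := ih (by omega)
    have hsh := foldl_shape (row1 n) (List.range' 1 t) g (fun g a => row1_shape n g a)
    rw [List.range'_concat, List.foldl_append]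
    simp only [List.foldl_cons, List.foldl_nil]
    generalize hgt : (List.range' 1 t).foldl (row1 n) g = gt at ih' hsh
    have hrow := row1_partial_getc gt (1 + t) n (by omega) (by rw [hsh.1]; omega)
      (by rw [hsh.2]; exact hn (1 + t) (by omega)) n le_rfl
    simp only [row1, Nat.one_mul]
    rw [hrow]
    by_cases hcase : i' = 1 + t ∧ j' < n
    · obtain ⟨h1, h2⟩ := hcase
      subst h1
      rw [if_pos ⟨rfl, h2⟩, if_pos ⟨by omega, h2⟩]
      unfold a1
      have e1 : getc gt (1 + t) j' = getc g (1 + t) j' := by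
        rw [ih', if_neg (by rintro ⟨h, _⟩; omega)]
      have e2 : getc gt (1 + t - 1) j' = colA g j' t := by
        have : 1 + t - 1 = t := by omega
        rw [this, ih', if_pos ⟨le_rfl, h2⟩]
      rw [e1, e2]
      have : 1 + t = t + 1 := by omega
      rw [this]
      rfl
    · rw [if_neg hcase, ih']
      by_cases h2 : j' < n
      · by_cases h3 : i' ≤ t
        · have h4 : i' ≤ t + 1 := by omega
          simp [h2, h3, h4]
        · have h4 : ¬ i' ≤ t + 1 := by
            have : i' ≠ 1 + t := fun h => hcase ⟨h, h2⟩
            omega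
          simp [h2, h3, h4]
      · simp [h2]


theorem body2_shape (g : List (List Int)) (i j : Nat) :
    (body2 g i j).length = g.length ∧ ∀ k, ((body2 g i j).getD k []).length = (g.getD k []).length := by
  unfold body2; split
  · exact ⟨by simp [setc], fun k => setc_rowlen g i j k _⟩
  · exact ⟨rfl, fun _ => rfl⟩

theorem row2_shape (n : Nat) (g : List (List Int)) (i : Nat) :
    (row2 n g i).length = g.length ∧ ∀ k, ((row2 n g i).getD k []).length = (g.getD k []).length :=
  foldl_shape _ _ _ (fun g a => body2_shape g i a)

theorem row2_partial_getc (g : List (List Int)) (i n : Nat) (hi : i < g.length)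
    (hn : n ≤ (g.getD i []).length) :
    ∀ t, t ≤ n → ∀ i' j',
      getc ((List.range t).foldl (fun g j => body2 g i j) g) i' j' =
        if i' = i ∧ j' < t ∧ getc g i' j' = 1 then 0 else getc g i' j' := by
  intro t
  induction t with
  | zero => intro _ i' j'; simp
  | succ t ih =>
    intro ht i' j'
    have ih' := ih (by omega)
    have hsh := foldl_shape (fun g j => body2 g i j) (List.range t) g (fun g a => body2_shape g i a)
    rw [List.range_succ, List.foldl_append]
    simp only [List.foldl_cons, List.foldl_nil]
    generalize hgt : (List.range t).foldl (fun g j => body2 g i j) g = gt at ih' hsh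
    have hread : getc gt i t = getc g i t := by rw [ih']; simp
    have hb : body2 gt i t = if getc g i t = 1 then setc gt i t 0 else gt := by
      rw [body2, hread]
    rw [hb]
    by_cases hc : getc g i t = 1
    · rw [if_pos hc, getc_setc]
      have hli : i < gt.length := by rw [hsh.1]; exact hi
      have hlt : t < (gt.getD i []).length := by rw [hsh.2 i]; omega
      by_cases he : i = i' ∧ t = j'
      · obtain ⟨he1, he2⟩ := he; subst he1; subst he2
        rw [if_pos ⟨rfl, rfl, hli, hlt⟩, if_pos ⟨rfl, by omega, hc⟩]
      · rw [if_neg (by tauto), ih']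
        by_cases hii : i' = i
        · subst hii
          by_cases hjt : j' < t
          · simp [hjt, Nat.lt_succ_of_lt hjt]
          · have h2 : ¬ j' < t + 1 := by
              have : j' ≠ t := fun h => he ⟨rfl, h.symm⟩
              omega
            simp [hjt, h2]
        · simp [hii]
    · rw [if_neg hc, ih']
      by_cases hii : i' = i
      · subst hii
        by_cases hjt : j' < t
        · simp [hjt, Nat.lt_succ_of_lt hjt]
        · by_cases hjt1 : j' < t + 1
          · have : j' = t := by omega
            subst this
            simp [hjt, hjt1, hc]
          · simp [hjt, hjt1]
      · simp [hii]

theorem pass2_partial_getc (g : List (List Int)) (n : Nat)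
    (hn : ∀ k < g.length, n ≤ (g.getD k []).length) :
    ∀ t, t ≤ g.length → ∀ i' j',
      getc ((List.range t).foldl (row2 n) g) i' j' =
        if i' < t ∧ j' < n ∧ getc g i' j' = 1 then 0 else getc g i' j' := by
  intro t
  induction t with
  | zero => intro _ i' j'; simp
  | succ t ih =>
    intro ht i' j'
    have ih' := ih (by omega)
    have hsh := foldl_shape (row2 n) (List.range t) g (fun g a => row2_shape n g a)
    rw [List.range_succ, List.foldl_append]
    simp only [List.foldl_cons, List.foldl_nil]
    generalize hgt : (List.range t).foldl (row2 n) g = gt at ih' hsh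
    have hrow := row2_partial_getc gt t n (by rw [hsh.1]; omega)
      (by rw [hsh.2]; exact hn t (by omega)) n le_rfl
    simp only [row2]
    rw [hrow]
    by_cases hii : i' = t
    · subst hii
      have hread : getc gt i' j' = getc g i' j' := by
        rw [ih', if_neg (by rintro ⟨h, _⟩; omega)]
      rw [hread]
      by_cases h2 : j' < n ∧ getc g i' j' = 1
      · rw [if_pos ⟨rfl, h2.1, h2.2⟩, if_pos ⟨by omega, h2⟩]
      · rw [if_neg (by rintro ⟨_, h3, h4⟩; exact h2 ⟨h3, h4⟩),
          if_neg (by rintro ⟨_, h3, h4⟩; exact h2 ⟨h3, h4⟩)]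
    · rw [if_neg (by tauto), ih']
      by_cases h3 : i' < t
      · simp [h3, Nat.lt_succ_of_lt h3]
      · have h4 : ¬ i' < t + 1 := by omega
        simp [h3, h4]



theorem colA_congr (g1 g2 : List (List Int)) (j : Nat)
    (h : ∀ i, getc g1 i j = getc g2 i j) : ∀ i, colA g1 j i = colA g2 j i := by
  intro i
  induction i with
  | zero => simp [colA, h 0]
  | succ i ih => simp [colA, h (i + 1), ih]

theorem bcol_partial (g : List (List Int)) (j m : Nat) (hm : m ≤ g.length)
    (hj : ∀ k < m, j < (g.getD k []).length) :
    ∀ t, t ≤ m →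
      ((List.range t).foldl (bstep j) (g, 0)).1.length = g.length ∧
      (∀ k, (((List.range t).foldl (bstep j) (g, 0)).1.getD k []).length = (g.getD k []).length) ∧
      (∀ i' j', getc ((List.range t).foldl (bstep j) (g, 0)).1 i' j' =
        if i' < t ∧ j' = j then tgt g i' j else getc g i' j') ∧
      ((List.range t).foldl (bstep j) (g, 0)).2 = if t = 0 then 0 else colA g j (t - 1) := by
  intro t
  induction t with
  | zero => exact fun _ => ⟨rfl, fun _ => rfl, fun i' j' => by simp, by simp⟩
  | succ t ih =>
    intro ht
    obtain ⟨hl, hr, hg, hp⟩ := ih (by omega)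
    rw [List.range_succ, List.foldl_append]
    simp only [List.foldl_cons, List.foldl_nil]
    generalize hgt : (List.range t).foldl (bstep j) (g, 0) = s at hl hr hg hp
    have hread : getc s.1 t j = getc g t j := by rw [hg]; simp
    have hval : (if 0 < t ∧ getc s.1 t j = 1 then s.2 + 1 else getc s.1 t j) = colA g j t := by
      rw [hread, hp]
      cases t with
      | zero => simp [colA]
      | succ k =>
        by_cases hc : getc g (k + 1) j = 1
        · simp [hc, colA]
        · simp [hc, colA]
    have hstep : bstep j s t =
        (setc s.1 t j (if colA g j t = 1 then 0 else colA g j t), colA g j t) := by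
      rw [bstep, hval]
    rw [hstep]
    refine ⟨by rw [setc_length, hl], fun k => by rw [setc_rowlen, hr], ?_, by simp [colA]⟩
    intro i' j'
    simp only
    rw [getc_setc]
    have hli : t < s.1.length := by rw [hl]; omega
    have hlj : j < (s.1.getD t []).length := by rw [hr]; exact hj t (by omega)
    by_cases he : t = i' ∧ j = j'
    · obtain ⟨he1, he2⟩ := he; subst he1; subst he2
      rw [if_pos ⟨rfl, rfl, hli, hlj⟩]
      simp [tgt]
    · rw [if_neg (by tauto), hg]
      by_cases hjj : j' = j
      · subst hjj
        have hit : i' ≠ t := fun h => he ⟨h.symm, rfl⟩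
        by_cases hlt : i' < t
        · simp [hlt, Nat.lt_succ_of_lt hlt]
        · have : ¬ i' < t + 1 := by omega
          simp [hlt, this]
      · simp [hjj]
theorem alt_partial (g : List (List Int)) (n m : Nat) (hm : m = g.length)
    (hn : ∀ k < g.length, n ≤ (g.getD k []).length) :
    ∀ t, t ≤ n →
      ((List.range t).foldl (bcol m) g).length = g.length ∧
      (∀ k, (((List.range t).foldl (bcol m) g).getD k []).length = (g.getD k []).length) ∧
      (∀ i' j', getc ((List.range t).foldl (bcol m) g) i' j' =
        if i' < m ∧ j' < t then tgt g i' j' else getc g i' j') := by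
  intro t
  induction t with
  | zero => exact fun _ => ⟨rfl, fun _ => rfl, fun i' j' => by simp⟩
  | succ t ih =>
    intro ht
    obtain ⟨hl, hr, hg⟩ := ih (by omega)
    rw [List.range_succ, List.foldl_append]
    simp only [List.foldl_cons, List.foldl_nil]
    generalize hgt : (List.range t).foldl (bcol m) g = gt at hl hr hg
    have hb := bcol_partial gt t m (by omega)
      (fun k hk => by rw [hr]; have := hn k (by omega); omega) m le_rfl
    obtain ⟨bl, br, bg, _⟩ := hb
    have hcol : ∀ i, getc gt i t = getc g i t := fun i => by
      rw [hg]; simp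
    have htgt : ∀ i, tgt gt i t = tgt g i t := fun i => by
      unfold tgt; rw [colA_congr gt g t hcol i]
    refine ⟨by rw [bcol, bl, hl], fun k => by rw [bcol, br, hr], ?_⟩
    intro i' j'
    rw [bcol, bg, hg]
    by_cases hjj : j' = t
    · subst hjj
      by_cases hi : i' < m
      · simp [hi, htgt i']
      · simp [hi]
    · rw [if_neg (by tauto)]
      by_cases h2 : j' < t
      · have : j' < t + 1 := by omega
        simp [h2, this]
      · have : ¬ j' < t + 1 := by omega
        simp [h2, this]

theorem main_eq (g : List (List Int)) (hne : g ≠ [])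
    (hpre : ∀ row ∈ g, (g.headD []).length ≤ row.length) :
    count_consecutive_above_1s g = count_consecutive_above_1s_alt g := by
  have hm : 0 < g.length := List.length_pos_iff.mpr hne
  set n := (g.headD []).length with hn
  have hrows : ∀ k < g.length, n ≤ (g.getD k []).length := by
    intro k hk
    have : g.getD k [] ∈ g := by
      rw [List.getD_eq_getElem _ _ hk]
      exact List.getElem_mem hk
    exact hpre _ this
  -- A side characterization
  have h1 := pass1_partial_getc g n hrows (g.length - 1) (by omega)
  have h1sh := foldl_shape (row1 n) (List.range' 1 (g.length - 1)) g (fun g a => row1_shape n g a)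
  generalize hg1 : (List.range' 1 (g.length - 1)).foldl (row1 n) g = g1 at h1 h1sh
  have hrows1 : ∀ k < g1.length, n ≤ (g1.getD k []).length := by
    intro k hk
    rw [h1sh.2]
    exact hrows k (by rw [← h1sh.1]; exact hk)
  have h2 := pass2_partial_getc g1 n hrows1 g.length (le_of_eq h1sh.1.symm)
  have h2sh := foldl_shape (row2 n) (List.range g.length) g1 (fun g a => row2_shape n g a)
  generalize hg2 : (List.range g.length).foldl (row2 n) g1 = ga at h2 h2sh
  -- B side characterization
  have hb := alt_partial g n g.length rfl hrows n le_rfl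
  generalize hgb : (List.range n).foldl (bcol g.length) g = gb at hb
  obtain ⟨bl, br, bgetc⟩ := hb
  -- the two ports compute ga and gb
  have ea : count_consecutive_above_1s g = ga := by
    simp only [count_consecutive_above_1s]
    rw [hg1, hg2]
  have eb : count_consecutive_above_1s_alt g = gb := by
    simp only [count_consecutive_above_1s_alt]
    rw [← hn, hgb]
  rw [ea, eb]
  apply grid_ext g
  · rw [h2sh.1, h1sh.1]
  · exact bl
  · intro k; rw [h2sh.2, h1sh.2]
  · exact br
  · intro i j
    rw [h2 i j, bgetc i j]
    by_cases hc : i < g.length ∧ j < n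
    · obtain ⟨hci, hcj⟩ := hc
      have e1 : getc g1 i j = colA g j i := by
        rw [h1, if_pos ⟨by omega, hcj⟩]
      rw [e1]
      by_cases h1' : colA g j i = 1
      · rw [if_pos ⟨hci, hcj, h1'⟩, if_pos ⟨hci, hcj⟩, tgt, if_pos h1']
      · rw [if_neg (by rintro ⟨_, _, hx⟩; exact h1' hx), if_pos ⟨hci, hcj⟩, tgt, if_neg h1']
    · have e1 : getc g1 i j = getc g i j := by
        rw [h1, if_neg (by rintro ⟨hx, hy⟩; exact hc ⟨by omega, hy⟩)]
      rw [e1, if_neg (by rintro ⟨hx, hy, _⟩; exact hc ⟨hx, hy⟩), if_neg hc]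

-- ===== VERDICT (by name: the statement is the Claim_ definition above) =====
theorem count_consecutive_above_1s_spec : Claim_equal_count_consecutive_above_1s := by
  intro g _ hpre
  exact main_eq g hpre.1 hpre.2
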